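-- pv_equiv track=rewrite | github.com/qqzxingchen/MarkDownEditor | CodeEditor/CustomVersion/Python3Version/PythonTextDocument.py | __findEscapeCharNumberFromRightToLeft
-- ===== SOURCE A (Python) =====
-- def __findEscapeCharNumberFromRightToLeft(lineText,pos):
--     if len(lineText) < pos:
--         return 0
--     index = pos - 1
--     escapeNumber = 0
--     while index >= 0:
--         if lineText[index] == '\\':
--             escapeNumber += 1
--             index -= 1
--         else:
--             return escapeNumber
--     return escapeNumber
-- ===== SOURCE B (Python) =====
-- def __findEscapeCharNumberFromRightToLeft(lineText, pos):
--     if len(lineText) < pos: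
--         return 0
--     prefix = lineText[:max(pos, 0)]
--     return len(prefix) - len(prefix.rstrip('\\'))
-- ===== Notes on version B (the rewrite author's own statement) =====
-- stated objective: simpler
-- what changed: Replaces the explicit right-to-left index loop with a slice of the prefix and a length difference against its rstrip('\\'), with no index bookkeeping.
import Mathlib
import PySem

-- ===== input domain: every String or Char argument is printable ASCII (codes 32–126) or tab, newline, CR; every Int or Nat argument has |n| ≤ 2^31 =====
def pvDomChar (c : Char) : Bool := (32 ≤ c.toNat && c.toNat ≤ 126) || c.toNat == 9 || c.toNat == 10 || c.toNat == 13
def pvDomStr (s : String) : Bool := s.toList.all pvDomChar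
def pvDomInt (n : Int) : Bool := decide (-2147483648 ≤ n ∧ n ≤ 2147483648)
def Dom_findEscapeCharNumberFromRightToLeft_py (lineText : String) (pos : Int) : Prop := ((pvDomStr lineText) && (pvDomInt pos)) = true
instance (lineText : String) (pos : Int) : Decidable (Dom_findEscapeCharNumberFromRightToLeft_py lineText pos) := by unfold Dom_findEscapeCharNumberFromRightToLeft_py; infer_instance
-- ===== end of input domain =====

-- B replaces A's explicit right-to-left index loop by a prefix slice and a
-- length difference against rstrip('\'); objective: simpler.


-- ===== PORT A =====
-- the 'while index >= 0' loop of A, step for step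
def pvLoopA (lineText : String) (index escapeNumber : Int) : Int :=
  if 0 ≤ index then
    if PySem.Str.pyGet? lineText index = some '\\' then
      pvLoopA lineText (index - 1) (escapeNumber + 1)
    else escapeNumber
  else escapeNumber
termination_by (index + 1).toNat
decreasing_by omega

def findEscapeCharNumberFromRightToLeft_py (lineText : String) (pos : Int) : Int :=
  if (PySem.Str.len lineText : Int) < pos then 0
  else pvLoopA lineText (pos - 1) 0

-- ===== PORT B =====
def findEscapeCharNumberFromRightToLeft_py_alt (lineText : String) (pos : Int) : Int :=
  if (PySem.Str.len lineText : Int) < pos then 0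
  else
    let pre := PySem.List.slice lineText.toList none (some (max pos 0))
    -- rstrip('\\') ported by hand for the one-char strip set (exact): drop trailing '\\'
    let stripped := (pre.reverse.dropWhile (fun c => c = '\\')).reverse
    (pre.length : Int) - (stripped.length : Int)

-- ===== PRECONDITION & SPEC =====
def Spec_findEscapeCharNumberFromRightToLeft_py (lineText : String) (pos : Int) (out : Int) : Prop := out = findEscapeCharNumberFromRightToLeft_py_alt lineText pos
instance (lineText : String) (pos : Int) (out : Int) : Decidable (Spec_findEscapeCharNumberFromRightToLeft_py lineText pos out) := by unfold Spec_findEscapeCharNumberFromRightToLeft_py; infer_instance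

-- ===== CLAIM (what is proved, stated in full; the proofs are below) =====
def Claim_equal_findEscapeCharNumberFromRightToLeft_py : Prop := ∀ (lineText : String) (pos : Int), Dom_findEscapeCharNumberFromRightToLeft_py lineText pos → Spec_findEscapeCharNumberFromRightToLeft_py lineText pos (findEscapeCharNumberFromRightToLeft_py lineText pos)

-- ===== LEMMAS AND PROOFS =====

-- number of trailing backslashes of a list
def pvTrail (l : List Char) : Nat := (l.reverse.takeWhile (fun c => c = '\\')).length

theorem pvTrail_nil : pvTrail [] = 0 := rfl

theorem pvTrail_append_bs (l : List Char) : pvTrail (l ++ ['\\']) = pvTrail l + 1 := by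
  simp [pvTrail, List.takeWhile]

theorem pvTrail_append_ne (l : List Char) (c : Char) (h : c ≠ '\\') :
    pvTrail (l ++ [c]) = 0 := by
  simp [pvTrail, List.takeWhile, h]

theorem pvLoopA_eq (lineText : String) (k : Nat) (e : Int)
    (hk : k ≤ lineText.toList.length) :
    pvLoopA lineText ((k : Int) - 1) e = e + (pvTrail (lineText.toList.take k) : Int) := by
  induction k generalizing e with
  | zero => simp [pvLoopA, pvTrail_nil]
  | succ k ih =>
    have hk' : k < lineText.toList.length := by omega
    have hidx : ((k + 1 : Nat) : Int) - 1 = (k : Int) := by push_cast; ring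
    rw [hidx]
    have hget : PySem.Str.pyGet? lineText (k : Int) = some lineText.toList[k] := by
      simp
    have htake : lineText.toList.take (k + 1) = lineText.toList.take k ++ [lineText.toList[k]] := by
      exact List.take_succ_eq_append_getElem hk'
    rw [pvLoopA, if_pos (by positivity), hget]
    by_cases hc : lineText.toList[k] = '\\'
    · rw [if_pos (by rw [hc]), ih (e + 1) (by omega)]
      rw [htake, hc, pvTrail_append_bs]
      push_cast; ring
    · rw [if_neg (by simpa using hc)]
      rw [htake, pvTrail_append_ne _ _ hc]
      simp

theorem pvAlt_eq (lineText : String) (pos : Int) (h : ¬ (PySem.Str.len lineText : Int) < pos) :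
    findEscapeCharNumberFromRightToLeft_py_alt lineText pos
      = (pvTrail (lineText.toList.take pos.toNat) : Int) := by
  unfold findEscapeCharNumberFromRightToLeft_py_alt
  rw [if_neg h]
  have hmax : max pos 0 = ((pos.toNat : Int)) := by omega
  rw [hmax, PySem.List.slice_to_natCast]
  set l := lineText.toList.take pos.toNat with hl
  have hsplit : (l.reverse.takeWhile (fun c => c = '\\')).length
      + (l.reverse.dropWhile (fun c => c = '\\')).length = l.length := by
    have h := congrArg List.length
      (List.takeWhile_append_dropWhile (p := fun c => decide (c = '\\')) (l := l.reverse))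
    rw [List.length_append, List.length_reverse] at h
    exact h
  simp only [List.length_reverse]
  have : pvTrail l + (l.reverse.dropWhile (fun c => c = '\\')).length = l.length := hsplit
  omega

theorem pvMain (lineText : String) (pos : Int) :
    findEscapeCharNumberFromRightToLeft_py lineText pos
      = findEscapeCharNumberFromRightToLeft_py_alt lineText pos := by
  unfold findEscapeCharNumberFromRightToLeft_py
  by_cases h : (PySem.Str.len lineText : Int) < pos
  · rw [if_pos h]
    unfold findEscapeCharNumberFromRightToLeft_py_alt
    rw [if_pos h]
  · rw [if_neg h, pvAlt_eq lineText pos h]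
    have hlen : (PySem.Str.len lineText : Int) = (lineText.toList.length : Int) := by
      simp [PySem.Str.len_eq]
    by_cases hp : 0 < pos
    · have hk : pos.toNat ≤ lineText.toList.length := by omega
      have hcast : ((pos.toNat : Int)) - 1 = pos - 1 := by omega
      have := pvLoopA_eq lineText pos.toNat 0 hk
      rw [hcast] at this
      simpa using this
    · -- pos ≤ 0: the loop exits at once and the prefix is empty
      have hneg : ¬ (0 ≤ pos - 1) := by omega
      rw [pvLoopA, if_neg hneg]
      have : pos.toNat = 0 := by omega
      simp [this, pvTrail_nil]

-- ===== VERDICT (by name: the statement is the Claim_ definition above) =====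
theorem findEscapeCharNumberFromRightToLeft_py_spec : Claim_equal_findEscapeCharNumberFromRightToLeft_py := by
  intro lineText pos _
  unfold Spec_findEscapeCharNumberFromRightToLeft_py
  exact pvMain lineText pos
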